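-- pv_equiv track=rewrite | github.com/DDJekal/Voice-KI_backend | test_korian_pdl.py | analyze_questions
-- ===== SOURCE A (Python) =====
-- def analyze_questions(questions):
--     """Analysiere welche Themen abgedeckt sind"""
--
--     categories = {
--         "Ausbildung Pflege": False,
--         "Weiterbildung PDL": False,
--         "Deutschkenntnisse B2": False,
--         "Vollzeit/Teilzeit": False,
--         "Gehalt (5.180€)": False,
--         "Urlaub/Benefits": False,
--         "Standorte": False
--     }
--
--     for q in questions:
--         question_lower = q.get("question", "").lower()
--         context = (q.get("context") or "").lower()
--         preamble = (q.get("preamble") or "").lower()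
--
--         # Check coverage
--         if any(w in question_lower for w in ["ausbildung", "alten", "krankenpflege"]):
--             categories["Ausbildung Pflege"] = True
--
--         if any(w in question_lower for w in ["weiterbildung", "pflegedienstleitung", "pdl"]):
--             categories["Weiterbildung PDL"] = True
--
--         if any(w in question_lower for w in ["deutsch", "b2", "sprachkenntnisse"]):
--             categories["Deutschkenntnisse B2"] = True
--
--         if any(w in question_lower for w in ["vollzeit", "teilzeit", "arbeitszeit"]):
--             categories["Vollzeit/Teilzeit"] = True
--
--         if "5.180" in question_lower or "5180" in question_lower or "gehalt" in question_lower: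
--             categories["Gehalt (5.180€)"] = True
--
--         if "urlaub" in question_lower or "urlaub" in preamble:
--             categories["Urlaub/Benefits"] = True
--
--         if any(w in question_lower for w in ["giesing", "germering", "neuperlach", "standort"]):
--             categories["Standorte"] = True
--
--     return categories
-- ===== SOURCE B (Python) =====
-- RULES = [
--     ("Ausbildung Pflege", ["ausbildung", "alten", "krankenpflege"], False),
--     ("Weiterbildung PDL", ["weiterbildung", "pflegedienstleitung", "pdl"], False),
--     ("Deutschkenntnisse B2", ["deutsch", "b2", "sprachkenntnisse"], False),
--     ("Vollzeit/Teilzeit", ["vollzeit", "teilzeit", "arbeitszeit"], False),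
--     ("Gehalt (5.180\u20ac)", ["5.180", "5180", "gehalt"], False),
--     ("Urlaub/Benefits", ["urlaub"], True),
--     ("Standorte", ["giesing", "germering", "neuperlach", "standort"], False),
-- ]
--
--
-- def analyze_questions(questions):
--     texts = [(q.get("question", "").lower(), (q.get("preamble") or "").lower())
--              for q in questions]
--     return {
--         name: any(any(t in ql or (use_pre and t in pl) for t in trigs)
--                   for ql, pl in texts)
--         for name, trigs, use_pre in RULES
--     }
-- ===== Notes on version B (the rewrite author's own statement) =====
-- stated objective: simpler
-- what changed: Replaced the hard-coded if-chain mutating a flags dict per question with a data-driven rules table (category, trigger substrings, uses-preamble flag): texts are extracted once, then the result dict is built per category with an any() over all questions, dropping the dead context variable.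
import Mathlib
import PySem

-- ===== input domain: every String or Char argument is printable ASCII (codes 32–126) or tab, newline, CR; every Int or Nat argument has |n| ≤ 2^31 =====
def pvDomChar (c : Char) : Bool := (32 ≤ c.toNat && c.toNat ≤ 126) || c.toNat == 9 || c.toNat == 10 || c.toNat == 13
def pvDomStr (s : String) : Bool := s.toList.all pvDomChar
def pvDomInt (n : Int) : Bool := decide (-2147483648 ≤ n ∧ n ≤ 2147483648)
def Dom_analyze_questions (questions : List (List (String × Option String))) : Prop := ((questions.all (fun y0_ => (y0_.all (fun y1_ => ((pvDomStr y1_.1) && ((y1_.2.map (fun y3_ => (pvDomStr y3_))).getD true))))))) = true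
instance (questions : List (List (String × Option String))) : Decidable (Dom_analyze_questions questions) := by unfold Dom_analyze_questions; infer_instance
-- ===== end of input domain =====

-- B is a data-driven rules table instead of A's per-question if-chain over a mutated flags dict; same return value (simpler, not faster).

-- ===== PORT A =====
-- one loop iteration of A's for-loop (the seven conditional flag updates)
def pvStepA (cats : PySem.Dict String Bool) (q : List (String × Option String)) : PySem.Dict String Bool :=
  let d := PySem.Dict.mk q
  let question_lower := PySem.Str.lower (((d.get? "question").getD (some "")).getD "")
  let _context := PySem.Str.lower (((d.get? "context").getD none).getD "")
  let preamble := PySem.Str.lower (((d.get? "preamble").getD none).getD "")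
  let cats := if ["ausbildung", "alten", "krankenpflege"].any (fun w => PySem.Str.isIn w question_lower) then cats.insert "Ausbildung Pflege" true else cats
  let cats := if ["weiterbildung", "pflegedienstleitung", "pdl"].any (fun w => PySem.Str.isIn w question_lower) then cats.insert "Weiterbildung PDL" true else cats
  let cats := if ["deutsch", "b2", "sprachkenntnisse"].any (fun w => PySem.Str.isIn w question_lower) then cats.insert "Deutschkenntnisse B2" true else cats
  let cats := if ["vollzeit", "teilzeit", "arbeitszeit"].any (fun w => PySem.Str.isIn w question_lower) then cats.insert "Vollzeit/Teilzeit" true else cats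
  let cats := if PySem.Str.isIn "5.180" question_lower || (PySem.Str.isIn "5180" question_lower || PySem.Str.isIn "gehalt" question_lower) then cats.insert "Gehalt (5.180€)" true else cats
  let cats := if PySem.Str.isIn "urlaub" question_lower || PySem.Str.isIn "urlaub" preamble then cats.insert "Urlaub/Benefits" true else cats
  let cats := if ["giesing", "germering", "neuperlach", "standort"].any (fun w => PySem.Str.isIn w question_lower) then cats.insert "Standorte" true else cats
  cats

def analyze_questions (questions : List (List (String × Option String))) : List (String × Bool) :=
  let categories : PySem.Dict String Bool :=
    ((((((PySem.Dict.empty.insert "Ausbildung Pflege" false).insert "Weiterbildung PDL" false).insert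
        "Deutschkenntnisse B2" false).insert "Vollzeit/Teilzeit" false).insert
        "Gehalt (5.180€)" false).insert "Urlaub/Benefits" false).insert "Standorte" false
  let categories := questions.foldl pvStepA categories
  categories.items

-- ===== PORT B =====
def pvRules : List (String × List String × Bool) :=
  [("Ausbildung Pflege", (["ausbildung", "alten", "krankenpflege"], false)),
   ("Weiterbildung PDL", (["weiterbildung", "pflegedienstleitung", "pdl"], false)),
   ("Deutschkenntnisse B2", (["deutsch", "b2", "sprachkenntnisse"], false)),
   ("Vollzeit/Teilzeit", (["vollzeit", "teilzeit", "arbeitszeit"], false)),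
   ("Gehalt (5.180€)", (["5.180", "5180", "gehalt"], false)),
   ("Urlaub/Benefits", (["urlaub"], true)),
   ("Standorte", (["giesing", "germering", "neuperlach", "standort"], false))]

def analyze_questions_alt (questions : List (List (String × Option String))) : List (String × Bool) :=
  let texts := questions.map (fun q =>
    (PySem.Str.lower ((((PySem.Dict.mk q).get? "question").getD (some "")).getD ""),
     PySem.Str.lower ((((PySem.Dict.mk q).get? "preamble").getD none).getD "")))
  pvRules.map (fun r =>
    (r.1, texts.any (fun t => r.2.1.any (fun trig =>
            PySem.Str.isIn trig t.1 || (r.2.2 && PySem.Str.isIn trig t.2)))))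

-- ===== PRECONDITION & SPEC =====
-- Pre_ excludes exactly the inputs where some question dict maps "question" to None: there
-- q.get("question", "").lower() raises AttributeError in A (and in B alike).
def Pre_analyze_questions (questions : List (List (String × Option String))) : Prop :=
  ∀ q ∈ questions, (PySem.Dict.mk q).get? "question" ≠ some (none : Option String)
instance (questions : List (List (String × Option String))) : Decidable (Pre_analyze_questions questions) := by unfold Pre_analyze_questions; infer_instance

def pvWitness_analyze_questions : (List (List (String × Option String))) :=
  [[("question", some "Wie hoch ist das Gehalt?"), ("preamble", none)]]

def Spec_analyze_questions (questions : List (List (String × Option String))) (out : List (String × Bool)) : Prop := out = analyze_questions_alt questions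
instance (questions : List (List (String × Option String))) (out : List (String × Bool)) : Decidable (Spec_analyze_questions questions out) := by unfold Spec_analyze_questions; infer_instance

-- ===== CLAIM (what is proved, stated in full; the proofs are below) =====
def Claim_equal_analyze_questions : Prop := ∀ (questions : List (List (String × Option String))), Dom_analyze_questions questions → Pre_analyze_questions questions → Spec_analyze_questions questions (analyze_questions questions)

-- ===== LEMMAS AND PROOFS =====

-- the two lowercased texts A and B both extract from a question dict
def pvQL (q : List (String × Option String)) : String :=
  PySem.Str.lower ((((PySem.Dict.mk q).get? "question").getD (some "")).getD "")
def pvPL (q : List (String × Option String)) : String :=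
  PySem.Str.lower ((((PySem.Dict.mk q).get? "preamble").getD none).getD "")

-- per-question flags, one per category, matching A's seven conditions
def pvF1 (q : List (String × Option String)) : Bool := ["ausbildung", "alten", "krankenpflege"].any (fun w => PySem.Str.isIn w (pvQL q))
def pvF2 (q : List (String × Option String)) : Bool := ["weiterbildung", "pflegedienstleitung", "pdl"].any (fun w => PySem.Str.isIn w (pvQL q))
def pvF3 (q : List (String × Option String)) : Bool := ["deutsch", "b2", "sprachkenntnisse"].any (fun w => PySem.Str.isIn w (pvQL q))
def pvF4 (q : List (String × Option String)) : Bool := ["vollzeit", "teilzeit", "arbeitszeit"].any (fun w => PySem.Str.isIn w (pvQL q))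
def pvF5 (q : List (String × Option String)) : Bool := PySem.Str.isIn "5.180" (pvQL q) || (PySem.Str.isIn "5180" (pvQL q) || PySem.Str.isIn "gehalt" (pvQL q))
def pvF6 (q : List (String × Option String)) : Bool := PySem.Str.isIn "urlaub" (pvQL q) || PySem.Str.isIn "urlaub" (pvPL q)
def pvF7 (q : List (String × Option String)) : Bool := ["giesing", "germering", "neuperlach", "standort"].any (fun w => PySem.Str.isIn w (pvQL q))

-- A's flags dict with arbitrary slot values
def pvBase (b1 b2 b3 b4 b5 b6 b7 : Bool) : PySem.Dict String Bool :=
  ((((((PySem.Dict.empty.insert "Ausbildung Pflege" b1).insert "Weiterbildung PDL" b2).insert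
      "Deutschkenntnisse B2" b3).insert "Vollzeit/Teilzeit" b4).insert
      "Gehalt (5.180€)" b5).insert "Urlaub/Benefits" b6).insert "Standorte" b7

theorem pvIns1 (b1 b2 b3 b4 b5 b6 b7 v : Bool) :
    (pvBase b1 b2 b3 b4 b5 b6 b7).insert "Ausbildung Pflege" v = pvBase v b2 b3 b4 b5 b6 b7 := by
  apply PySem.Dict.ext
  simp [pvBase, PySem.Dict.items_insert, PySem.Dict.contains_insert, PySem.Dict.empty]

theorem pvIns2 (b1 b2 b3 b4 b5 b6 b7 v : Bool) :
    (pvBase b1 b2 b3 b4 b5 b6 b7).insert "Weiterbildung PDL" v = pvBase b1 v b3 b4 b5 b6 b7 := by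
  apply PySem.Dict.ext
  simp [pvBase, PySem.Dict.items_insert, PySem.Dict.contains_insert, PySem.Dict.empty]

theorem pvIns3 (b1 b2 b3 b4 b5 b6 b7 v : Bool) :
    (pvBase b1 b2 b3 b4 b5 b6 b7).insert "Deutschkenntnisse B2" v = pvBase b1 b2 v b4 b5 b6 b7 := by
  apply PySem.Dict.ext
  simp [pvBase, PySem.Dict.items_insert, PySem.Dict.contains_insert, PySem.Dict.empty]

theorem pvIns4 (b1 b2 b3 b4 b5 b6 b7 v : Bool) :
    (pvBase b1 b2 b3 b4 b5 b6 b7).insert "Vollzeit/Teilzeit" v = pvBase b1 b2 b3 v b5 b6 b7 := by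
  apply PySem.Dict.ext
  simp [pvBase, PySem.Dict.items_insert, PySem.Dict.contains_insert, PySem.Dict.empty]

theorem pvIns5 (b1 b2 b3 b4 b5 b6 b7 v : Bool) :
    (pvBase b1 b2 b3 b4 b5 b6 b7).insert "Gehalt (5.180€)" v = pvBase b1 b2 b3 b4 v b6 b7 := by
  apply PySem.Dict.ext
  simp [pvBase, PySem.Dict.items_insert, PySem.Dict.contains_insert, PySem.Dict.empty]

theorem pvIns6 (b1 b2 b3 b4 b5 b6 b7 v : Bool) :
    (pvBase b1 b2 b3 b4 b5 b6 b7).insert "Urlaub/Benefits" v = pvBase b1 b2 b3 b4 b5 v b7 := by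
  apply PySem.Dict.ext
  simp [pvBase, PySem.Dict.items_insert, PySem.Dict.contains_insert, PySem.Dict.empty]

theorem pvIns7 (b1 b2 b3 b4 b5 b6 b7 v : Bool) :
    (pvBase b1 b2 b3 b4 b5 b6 b7).insert "Standorte" v = pvBase b1 b2 b3 b4 b5 b6 v := by
  apply PySem.Dict.ext
  simp [pvBase, PySem.Dict.items_insert, PySem.Dict.contains_insert, PySem.Dict.empty]

theorem pvCond1 (b1 b2 b3 b4 b5 b6 b7 : Bool) (c : Bool) :
    (if c then (pvBase b1 b2 b3 b4 b5 b6 b7).insert "Ausbildung Pflege" true else pvBase b1 b2 b3 b4 b5 b6 b7)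
      = pvBase (b1 || c) b2 b3 b4 b5 b6 b7 := by cases c <;> simp [pvIns1]

theorem pvCond2 (b1 b2 b3 b4 b5 b6 b7 : Bool) (c : Bool) :
    (if c then (pvBase b1 b2 b3 b4 b5 b6 b7).insert "Weiterbildung PDL" true else pvBase b1 b2 b3 b4 b5 b6 b7)
      = pvBase b1 (b2 || c) b3 b4 b5 b6 b7 := by cases c <;> simp [pvIns2]

theorem pvCond3 (b1 b2 b3 b4 b5 b6 b7 : Bool) (c : Bool) :
    (if c then (pvBase b1 b2 b3 b4 b5 b6 b7).insert "Deutschkenntnisse B2" true else pvBase b1 b2 b3 b4 b5 b6 b7)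
      = pvBase b1 b2 (b3 || c) b4 b5 b6 b7 := by cases c <;> simp [pvIns3]

theorem pvCond4 (b1 b2 b3 b4 b5 b6 b7 : Bool) (c : Bool) :
    (if c then (pvBase b1 b2 b3 b4 b5 b6 b7).insert "Vollzeit/Teilzeit" true else pvBase b1 b2 b3 b4 b5 b6 b7)
      = pvBase b1 b2 b3 (b4 || c) b5 b6 b7 := by cases c <;> simp [pvIns4]

theorem pvCond5 (b1 b2 b3 b4 b5 b6 b7 : Bool) (c : Bool) :
    (if c then (pvBase b1 b2 b3 b4 b5 b6 b7).insert "Gehalt (5.180€)" true else pvBase b1 b2 b3 b4 b5 b6 b7)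
      = pvBase b1 b2 b3 b4 (b5 || c) b6 b7 := by cases c <;> simp [pvIns5]

theorem pvCond6 (b1 b2 b3 b4 b5 b6 b7 : Bool) (c : Bool) :
    (if c then (pvBase b1 b2 b3 b4 b5 b6 b7).insert "Urlaub/Benefits" true else pvBase b1 b2 b3 b4 b5 b6 b7)
      = pvBase b1 b2 b3 b4 b5 (b6 || c) b7 := by cases c <;> simp [pvIns6]

theorem pvCond7 (b1 b2 b3 b4 b5 b6 b7 : Bool) (c : Bool) :
    (if c then (pvBase b1 b2 b3 b4 b5 b6 b7).insert "Standorte" true else pvBase b1 b2 b3 b4 b5 b6 b7)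
      = pvBase b1 b2 b3 b4 b5 b6 (b7 || c) := by cases c <;> simp [pvIns7]

theorem pvStepA_base (b1 b2 b3 b4 b5 b6 b7 : Bool) (q : List (String × Option String)) :
    pvStepA (pvBase b1 b2 b3 b4 b5 b6 b7) q =
      pvBase (b1 || pvF1 q) (b2 || pvF2 q) (b3 || pvF3 q) (b4 || pvF4 q)
             (b5 || pvF5 q) (b6 || pvF6 q) (b7 || pvF7 q) := by
  show (let cats := if pvF1 q then (pvBase b1 b2 b3 b4 b5 b6 b7).insert "Ausbildung Pflege" true else pvBase b1 b2 b3 b4 b5 b6 b7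
        let cats := if pvF2 q then cats.insert "Weiterbildung PDL" true else cats
        let cats := if pvF3 q then cats.insert "Deutschkenntnisse B2" true else cats
        let cats := if pvF4 q then cats.insert "Vollzeit/Teilzeit" true else cats
        let cats := if pvF5 q then cats.insert "Gehalt (5.180€)" true else cats
        let cats := if pvF6 q then cats.insert "Urlaub/Benefits" true else cats
        let cats := if pvF7 q then cats.insert "Standorte" true else cats
        cats) = _
  simp only [pvCond1, pvCond2, pvCond3, pvCond4, pvCond5, pvCond6, pvCond7]

theorem pvLoopA (qs : List (List (String × Option String))) :
    ∀ b1 b2 b3 b4 b5 b6 b7 : Bool,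
      qs.foldl pvStepA (pvBase b1 b2 b3 b4 b5 b6 b7) =
        pvBase (b1 || qs.any pvF1) (b2 || qs.any pvF2) (b3 || qs.any pvF3)
               (b4 || qs.any pvF4) (b5 || qs.any pvF5) (b6 || qs.any pvF6)
               (b7 || qs.any pvF7) := by
  induction qs with
  | nil => simp
  | cons q qs ih =>
      intro b1 b2 b3 b4 b5 b6 b7
      simp only [List.foldl_cons, pvStepA_base, ih, List.any_cons, Bool.or_assoc]

-- ===== VERDICT (by name: the statement is the Claim_ definition above) =====
theorem analyze_questions_spec : Claim_equal_analyze_questions := by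
  intro qs _hDom _hPre
  show analyze_questions qs = analyze_questions_alt qs
  show (qs.foldl pvStepA (pvBase false false false false false false false)).items = _
  rw [pvLoopA]
  simp [pvBase, PySem.Dict.items_insert, PySem.Dict.contains_insert,
    PySem.Dict.empty, analyze_questions_alt, pvRules, List.any_map]
  refine ⟨?_, ?_, ?_, ?_, ?_, ?_, ?_⟩ <;>
    (refine congrArg qs.any (funext fun q => ?_);
     simp [Function.comp, pvF1, pvF2, pvF3, pvF4, pvF5, pvF6, pvF7, pvQL, pvPL])
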